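-- pv_equiv track=rewrite | github.com/AimeeLiu01/2021interview | LeetCode/字符串/1460.py | canBeEqual
-- ===== SOURCE A (Python) =====
-- def canBeEqual(target, arr):
--     ndict = {}
--     ndict2 = {}
--     for i in range(len(target)):
--         if target[i] not in ndict:
--             ndict[target[i]] = 1
--         else:
--             ndict[target[i]] += 1
--     for i in range(len(arr)):
--         if arr[i] not in ndict2:
--             ndict2[arr[i]] = 1
--         else:
--             ndict2[arr[i]] += 1
--     return ndict2 == ndict
-- ===== SOURCE B (Python) =====
-- def canBeEqual(target, arr):
--     return sorted(target) == sorted(arr)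
-- ===== Notes on version B (the rewrite author's own statement) =====
-- stated objective: idiomatic
-- what changed: Replaces the two manual frequency-dictionary loops and the dict comparison with the idiomatic sort-then-compare one-liner: sorted(target) == sorted(arr).
import Mathlib
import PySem

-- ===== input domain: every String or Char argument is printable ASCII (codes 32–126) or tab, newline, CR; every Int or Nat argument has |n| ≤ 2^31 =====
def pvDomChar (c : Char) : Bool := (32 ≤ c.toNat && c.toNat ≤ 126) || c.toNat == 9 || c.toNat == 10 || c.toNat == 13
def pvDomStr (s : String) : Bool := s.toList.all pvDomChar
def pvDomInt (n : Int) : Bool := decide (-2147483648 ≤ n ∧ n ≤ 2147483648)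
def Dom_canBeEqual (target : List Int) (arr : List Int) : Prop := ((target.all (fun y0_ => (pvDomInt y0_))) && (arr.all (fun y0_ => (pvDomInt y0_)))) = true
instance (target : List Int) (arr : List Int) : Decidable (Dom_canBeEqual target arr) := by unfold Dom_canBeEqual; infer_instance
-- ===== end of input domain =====

-- B replaces A's two hand-rolled frequency dictionaries and the dict comparison by the
-- idiomatic sort-then-compare one-liner; return values proved equal on all integer lists.

-- ===== PORT A =====
-- Python's `d1 == d2` on dicts ignores insertion order: same number of keys and every
-- item of d1 found with the same value in d2.
def pyDictEq (d1 d2 : PySem.Dict Int Int) : Bool :=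
  d1.size == d2.size && d1.items.all (fun p => d2.get? p.1 == some p.2)

def canBeEqual (target : List Int) (arr : List Int) : Bool :=
  let ndict : PySem.Dict Int Int :=
    (PySem.List.pyRange 0 (PySem.List.len target) 1).foldl
      (fun d i =>
        if !(d.contains (PySem.List.pyGetD target i 0)) then
          d.insert (PySem.List.pyGetD target i 0) 1
        else
          d.insert (PySem.List.pyGetD target i 0) (d.getD (PySem.List.pyGetD target i 0) 0 + 1))
      PySem.Dict.empty
  let ndict2 : PySem.Dict Int Int :=
    (PySem.List.pyRange 0 (PySem.List.len arr) 1).foldl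
      (fun d i =>
        if !(d.contains (PySem.List.pyGetD arr i 0)) then
          d.insert (PySem.List.pyGetD arr i 0) 1
        else
          d.insert (PySem.List.pyGetD arr i 0) (d.getD (PySem.List.pyGetD arr i 0) 0 + 1))
      PySem.Dict.empty
  pyDictEq ndict2 ndict

-- ===== PORT B =====
def canBeEqual_alt (target : List Int) (arr : List Int) : Bool :=
  PySem.List.sorted target (fun x => x) false == PySem.List.sorted arr (fun x => x) false

-- ===== PRECONDITION & SPEC =====
def Spec_canBeEqual (target : List Int) (arr : List Int) (out : Bool) : Prop := out = canBeEqual_alt target arr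
instance (target : List Int) (arr : List Int) (out : Bool) : Decidable (Spec_canBeEqual target arr out) := by unfold Spec_canBeEqual; infer_instance

-- ===== CLAIM (what is proved, stated in full; the proofs are below) =====
def Claim_equal_canBeEqual : Prop := ∀ (target : List Int) (arr : List Int), Dom_canBeEqual target arr → Spec_canBeEqual target arr (canBeEqual target arr)

-- ===== LEMMAS AND PROOFS =====

-- A's index loop builds exactly Counter(xs)
lemma fold_eq_counter (xs : List Int) :
    (PySem.List.pyRange 0 (PySem.List.len xs) 1).foldl
      (fun d i =>
        if !(d.contains (PySem.List.pyGetD xs i 0)) then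
          d.insert (PySem.List.pyGetD xs i 0) 1
        else
          d.insert (PySem.List.pyGetD xs i 0) (d.getD (PySem.List.pyGetD xs i 0) 0 + 1))
      PySem.Dict.empty = PySem.Dict.counter xs := by
  refine (PySem.List.foldl_pyRange_zero_pyGetD xs 0
    (fun (d : PySem.Dict Int Int) (x : Int) => if !(d.contains x) then d.insert x 1
                else d.insert x (d.getD x 0 + 1)) PySem.Dict.empty).trans ?_
  rw [← PySem.Dict.foldl_insert_getD_add_one_eq_counter]
  congr 1
  funext d x
  by_cases h : d.contains x
  · simp [h]
  · simp only [Bool.not_eq_true] at h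
    simp only [h]
    rw [PySem.Dict.getD_of_not_contains (h := h)]
    simp

lemma get?_counter_of_mem {xs : List Int} {v : Int} (h : v ∈ xs) :
    (PySem.Dict.counter xs).get? v = some (xs.count v : Int) := by
  refine PySem.Dict.get?_of_mem_items _ ?_ (PySem.Dict.nodup_keys_counter xs)
  rw [PySem.Dict.items_counter]
  exact List.mem_map.mpr ⟨v, (PySem.Set.mem_ofList xs v).mpr h, rfl⟩

lemma get?_counter_of_not_mem {xs : List Int} {v : Int} (h : v ∉ xs) :
    (PySem.Dict.counter xs).get? v = none := by
  rw [PySem.Dict.get?_eq_none_iff_not_mem_keys, PySem.Dict.keys_counter]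
  exact fun hm => h ((PySem.Set.mem_ofList xs v).mp hm)

lemma pyDictEq_counter_iff (arr target : List Int) :
    pyDictEq (PySem.Dict.counter arr) (PySem.Dict.counter target) = true ↔
      ∀ v : Int, arr.count v = target.count v := by
  unfold pyDictEq
  simp only [Bool.and_eq_true, beq_iff_eq, List.all_eq_true]
  constructor
  · rintro ⟨hsize, hitems⟩ v
    by_cases hv : v ∈ arr
    · have hmem : (v, (arr.count v : Int)) ∈ (PySem.Dict.counter arr).items := by
        rw [PySem.Dict.items_counter]
        exact List.mem_map.mpr ⟨v, (PySem.Set.mem_ofList arr v).mpr hv, rfl⟩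
      have := hitems _ hmem
      by_cases hvt : v ∈ target
      · rw [get?_counter_of_mem hvt] at this
        have h2 := (Option.some.inj this).symm
        simpa using h2
      · rw [get?_counter_of_not_mem hvt] at this
        exact absurd this (by simp)
    · -- v ∉ arr: show v ∉ target via size equality
      have hsub : ∀ k ∈ PySem.Set.ofList arr, k ∈ PySem.Set.ofList target := by
        intro k hk
        have hmem : (k, (arr.count k : Int)) ∈ (PySem.Dict.counter arr).items := by
          rw [PySem.Dict.items_counter]
          exact List.mem_map.mpr ⟨k, hk, rfl⟩
        have := hitems _ hmem
        by_contra hkt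
        rw [get?_counter_of_not_mem (fun h => hkt ((PySem.Set.mem_ofList target k).mpr h))] at this
        exact absurd this (by simp)
      have hlen : (PySem.Dict.counter arr).size = (PySem.Dict.counter target).size := hsize
      have hlen' : (PySem.Set.ofList arr).length = (PySem.Set.ofList target).length := by
        have h1 := congrArg List.length (PySem.Dict.items_counter (xs := arr))
        have h2 := congrArg List.length (PySem.Dict.items_counter (xs := target))
        simp only [List.length_map] at h1 h2
        simpa [PySem.Dict.size, h1, h2] using hlen
      -- subset + nodup + equal length ⇒ same membership
      have hndA := PySem.Set.nodup_ofList (xs := arr)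
      have hndT := PySem.Set.nodup_ofList (xs := target)
      have hfin : (PySem.Set.ofList arr).toFinset = (PySem.Set.ofList target).toFinset := by
        apply Finset.eq_of_subset_of_card_le
        · intro k hk
          exact List.mem_toFinset.mpr (hsub k (List.mem_toFinset.mp hk))
        · rw [List.toFinset_card_of_nodup hndA, List.toFinset_card_of_nodup hndT, hlen']
      by_cases hvt : v ∈ target
      · exfalso
        have : v ∈ (PySem.Set.ofList target).toFinset :=
          List.mem_toFinset.mpr ((PySem.Set.mem_ofList target v).mpr hvt)
        rw [← hfin] at this
        exact hv ((PySem.Set.mem_ofList arr v).mp (List.mem_toFinset.mp this))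
      · rw [List.count_eq_zero_of_not_mem hv, List.count_eq_zero_of_not_mem hvt]
  · intro hcnt
    have hperm : arr.Perm target := List.perm_iff_count.mpr hcnt
    constructor
    · have hset : PySem.Set.ofList arr = PySem.Set.ofList target → True := fun _ => trivial
      have hpermset : (PySem.Set.ofList arr).Perm (PySem.Set.ofList target) := by
        rw [List.perm_ext_iff_of_nodup (PySem.Set.nodup_ofList arr) (PySem.Set.nodup_ofList target)]
        intro a
        rw [PySem.Set.mem_ofList, PySem.Set.mem_ofList]
        exact ⟨fun h => hperm.mem_iff.mp h, fun h => hperm.mem_iff.mpr h⟩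
      have := hpermset.length_eq
      simp [PySem.Dict.size, PySem.Dict.items_counter, this]
    · intro p hp
      rw [PySem.Dict.items_counter] at hp
      obtain ⟨k, hk, rfl⟩ := List.mem_map.mp hp
      have hka : k ∈ arr := (PySem.Set.mem_ofList arr k).mp hk
      have hkt : k ∈ target := hperm.mem_iff.mp hka
      rw [get?_counter_of_mem hkt]
      simp [hcnt k]

-- ===== VERDICT (by name: the statement is the Claim_ definition above) =====
theorem canBeEqual_spec : Claim_equal_canBeEqual := by
  intro target arr _
  unfold Spec_canBeEqual canBeEqual canBeEqual_alt
  simp only [fold_eq_counter]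
  rw [Bool.eq_iff_iff, pyDictEq_counter_iff]
  rw [beq_iff_eq, PySem.List.sorted_id_eq_sorted_id_iff_perm]
  constructor
  · intro h; exact (List.perm_iff_count.mpr (fun v => h v)).symm
  · intro h v; exact List.perm_iff_count.mp h.symm v
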